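-- pv_equiv track=rewrite | github.com/DominikSzczepaniak/University | Semestr1/Wstęp do programowania Python/lista11/2.py | slowo_na_cyfre
-- ===== SOURCE A (Python) =====
-- from collections import defaultdict as dd
--
-- def slowo_na_cyfre(slowo):
--     slownik = dd(lambda: 0)
--     wartosc = 1
--     for litera in slowo:
--         if(slownik[litera] == 0):
--             slownik[litera] = wartosc
--             wartosc += 1
--     wynik = ""
--     for id, litera in enumerate(slowo):
--         wynik += str(slownik[litera])
--         if(id != len(slowo)-1):
--             wynik += str("-")
--     return wynik
-- ===== SOURCE B (Python) =====
-- def slowo_na_cyfre(slowo):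
--     # one pass: assign appearance-order numbers and emit pieces as we go, then join
--     seen = {}
--     nxt = 1
--     pieces = []
--     for litera in slowo:
--         v = seen.get(litera)
--         if v is None:
--             seen[litera] = nxt
--             pieces.append(str(nxt))
--             nxt += 1
--         else:
--             pieces.append(str(v))
--     return "-".join(pieces)
-- ===== Notes on version B (the rewrite author's own statement) =====
-- stated objective: simpler
-- what changed: Fuses A's two passes (build the number table, then re-scan with enumerate and manual last-index separator handling) into a single pass that assigns numbers and collects the pieces at once, finished by one dash-join.
import Mathlib
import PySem

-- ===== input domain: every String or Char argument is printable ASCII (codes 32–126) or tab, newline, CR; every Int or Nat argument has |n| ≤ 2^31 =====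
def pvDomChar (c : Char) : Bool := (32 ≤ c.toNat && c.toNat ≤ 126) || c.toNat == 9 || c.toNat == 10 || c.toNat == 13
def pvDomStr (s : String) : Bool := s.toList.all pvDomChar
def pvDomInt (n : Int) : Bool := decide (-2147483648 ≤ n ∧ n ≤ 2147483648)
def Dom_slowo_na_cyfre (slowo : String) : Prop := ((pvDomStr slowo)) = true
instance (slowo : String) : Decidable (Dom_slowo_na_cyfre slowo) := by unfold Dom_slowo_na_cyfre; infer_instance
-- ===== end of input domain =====

-- B fuses A's two passes (number table, then an enumerate re-scan with manual separators)
-- into one pass collecting pieces, finished by a single '-'.join; equal return value proved.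

-- ===== PORT A =====
-- first loop: build the appearance-order table (defaultdict read + overwrite = insert when the default 0 is read)
def slowoTbl : List Char → PySem.Dict Char Int → Int → PySem.Dict Char Int × Int
  | [], slownik, wartosc => (slownik, wartosc)
  | litera :: rest, slownik, wartosc =>
    if slownik.getD litera 0 == 0 then slowoTbl rest (slownik.insert litera wartosc) (wartosc + 1)
    else slowoTbl rest slownik wartosc

-- second loop: for id, litera in enumerate(slowo): wynik += str(...) (+ "-" unless last index)
def slowoEmit (slownik : PySem.Dict Char Int) (n : Int) : List (Int × Char) → List Char → List Char
  | [], wynik => wynik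
  | (id, litera) :: rest, wynik =>
    slowoEmit slownik n rest
      ((wynik ++ PySem.Int.toChars (slownik.getD litera 0)) ++ (if id ≠ n - 1 then ['-'] else []))

def slowo_na_cyfre (slowo : String) : String :=
  let cs := slowo.toList
  let slownik := (slowoTbl cs PySem.Dict.empty 1).1
  String.ofList (slowoEmit slownik (PySem.Str.len slowo) (PySem.List.enumerate cs 0) [])

-- ===== PORT B =====
def altLoop : List Char → PySem.Dict Char Int → Int → List String → PySem.Dict Char Int × Int × List String
  | [], seen, nxt, pieces => (seen, nxt, pieces)
  | litera :: rest, seen, nxt, pieces =>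
    match seen.get? litera with
    | none => altLoop rest (seen.insert litera nxt) (nxt + 1) (pieces ++ [PySem.Int.toStr nxt])
    | some v => altLoop rest seen nxt (pieces ++ [PySem.Int.toStr v])

def slowo_na_cyfre_alt (slowo : String) : String :=
  PySem.Str.join "-" (altLoop slowo.toList PySem.Dict.empty 1 []).2.2

-- ===== PRECONDITION & SPEC =====
def Spec_slowo_na_cyfre (slowo : String) (out : String) : Prop := out = slowo_na_cyfre_alt slowo
instance (slowo : String) (out : String) : Decidable (Spec_slowo_na_cyfre slowo out) := by unfold Spec_slowo_na_cyfre; infer_instance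

-- ===== CLAIM (what is proved, stated in full; the proofs are below) =====
def Claim_equal_slowo_na_cyfre : Prop := ∀ (slowo : String), Dom_slowo_na_cyfre slowo → Spec_slowo_na_cyfre slowo (slowo_na_cyfre slowo)

-- ===== LEMMAS AND PROOFS =====

-- pieces joined the way A's emitter concatenates: separator after every piece but the last
def dashJoin : List (List Char) → List Char
  | [] => []
  | [p] => p
  | p :: q :: r => p ++ '-' :: dashJoin (q :: r)

-- branch shapes of A's table loop
theorem slowoTbl_cons_pos (d : PySem.Dict Char Int) (litera : Char) (rest : List Char) (w : Int)
    (hz : d.getD litera 0 = 0) :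
    slowoTbl (litera :: rest) d w = slowoTbl rest (d.insert litera w) (w + 1) := by
  simp [slowoTbl, hz]

theorem slowoTbl_cons_neg (d : PySem.Dict Char Int) (litera : Char) (rest : List Char) (w : Int)
    (hz : d.getD litera 0 ≠ 0) :
    slowoTbl (litera :: rest) d w = slowoTbl rest d w := by
  simp [slowoTbl, hz]

-- A never overwrites an assigned (nonzero) number
theorem slowoTbl_preserve (l : List Char) : ∀ (d : PySem.Dict Char Int) (w : Int) (c : Char) (v : Int),
    d.get? c = some v → v ≠ 0 → ((slowoTbl l d w).1).get? c = some v := by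
  induction l with
  | nil => intro d w c v h _; simpa [slowoTbl] using h
  | cons litera rest ih =>
    intro d w c v h hv
    by_cases hb : d.getD litera 0 = 0
    · have hne : c ≠ litera := by
        intro he; subst he
        rw [PySem.Dict.getD_of_get?_eq_some _ 0 h] at hb; exact hv hb
      rw [slowoTbl_cons_pos _ _ _ _ hb]
      exact ih _ _ _ _ (by rw [PySem.Dict.get?_insert_of_ne _ _ hne]; exact h) hv
    · rw [slowoTbl_cons_neg _ _ _ _ hb]
      exact ih _ _ _ _ h hv

-- B's single pass computes A's table/counter and emits exactly the final-table lookups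
theorem altLoop_eq (l : List Char) : ∀ (d : PySem.Dict Char Int) (n : Int) (acc : List String),
    (∀ c v, d.get? c = some v → v ≠ 0) → 1 ≤ n →
    altLoop l d n acc =
      ((slowoTbl l d n).1, (slowoTbl l d n).2,
        acc ++ l.map (fun c => PySem.Int.toStr (((slowoTbl l d n).1).getD c 0))) := by
  induction l with
  | nil => intro d n acc _ _; simp [altLoop, slowoTbl]
  | cons litera rest ih =>
    intro d n acc hInv hn
    rcases hg : d.get? litera with _ | v
    · have hz : d.getD litera 0 = 0 := PySem.Dict.getD_of_get?_eq_none _ 0 hg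
      have hfin : ((slowoTbl rest (d.insert litera n) (n + 1)).1).get? litera = some n :=
        slowoTbl_preserve rest _ _ _ _ (PySem.Dict.get?_insert_self _ _ _) (by omega)
      have hInv' : ∀ c v, (d.insert litera n).get? c = some v → v ≠ 0 := by
        intro c v h
        by_cases hc : c = litera
        · subst hc; rw [PySem.Dict.get?_insert_self] at h
          cases h; omega
        · rw [PySem.Dict.get?_insert_of_ne _ _ hc] at h; exact hInv c v h
      simp only [altLoop, hg]
      rw [slowoTbl_cons_pos _ _ _ _ hz, ih _ _ _ hInv' (by omega), List.map_cons,
        PySem.Dict.getD_of_get?_eq_some _ 0 hfin]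
      simp
    · have hvne : v ≠ 0 := hInv _ _ hg
      have hz : d.getD litera 0 = v := PySem.Dict.getD_of_get?_eq_some _ 0 hg
      have hfin : ((slowoTbl rest d n).1).get? litera = some v :=
        slowoTbl_preserve rest _ _ _ _ hg hvne
      simp only [altLoop, hg]
      rw [slowoTbl_cons_neg _ _ _ _ (by rw [hz]; exact hvne), ih _ _ _ hInv hn, List.map_cons,
        PySem.Dict.getD_of_get?_eq_some _ 0 hfin]
      simp

-- A's enumerate loop over a suffix starting at index s (s + |l| = n) is acc ++ dashJoin of the pieces
theorem slowoEmit_eq (d : PySem.Dict Char Int) (n : Int) (l : List Char) :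
    ∀ (s : Int) (acc : List Char), s + l.length = n →
    slowoEmit d n (PySem.List.enumerate l s) acc
      = acc ++ dashJoin (l.map (fun c => PySem.Int.toChars (d.getD c 0))) := by
  induction l with
  | nil => intro s acc _; simp [PySem.List.enumerate_nil, slowoEmit, dashJoin]
  | cons c rest ih =>
    intro s acc hs
    rw [PySem.List.enumerate_cons]
    cases rest with
    | nil =>
      have hlast : s = n - 1 := by simp at hs; omega
      simp [slowoEmit, hlast, dashJoin]
    | cons r rs =>
      have hne : s ≠ n - 1 := by simp at hs ⊢; omega
      simp only [slowoEmit, if_pos hne]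
      rw [ih (s + 1) _ (by simp at hs ⊢; omega)]
      simp [dashJoin, List.append_assoc]

theorem join_dash_eq (ps : List String) :
    (PySem.Str.join "-" ps).toList = dashJoin (ps.map String.toList) := by
  induction ps with
  | nil => simp [PySem.Str.join, PySem.Chars.join_nil, dashJoin]
  | cons p rest ih =>
    cases rest with
    | nil => simp [PySem.Str.join, PySem.Chars.join_singleton, dashJoin]
    | cons q r =>
      simp only [PySem.Str.toList_join, List.map_cons] at ih ⊢
      rw [PySem.Chars.join_cons_cons, ih, dashJoin]
      simp

-- ===== VERDICT (by name: the statement is the Claim_ definition above) =====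
theorem slowo_na_cyfre_spec : Claim_equal_slowo_na_cyfre := by
  intro slowo _
  unfold Spec_slowo_na_cyfre slowo_na_cyfre slowo_na_cyfre_alt
  rw [altLoop_eq slowo.toList PySem.Dict.empty 1 []
    (by intro c v h; rw [PySem.Dict.get?_empty] at h; cases h) le_rfl]
  apply String.ext
  rw [join_dash_eq]
  simp only [List.nil_append, List.map_map]
  rw [slowoEmit_eq _ _ slowo.toList 0 [] (by simp [PySem.Str.len_eq])]
  simp [Function.comp_def, PySem.Int.toList_toStr]
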